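-- pv_equiv track=rewrite | github.com/respectus/Rosalind | dev/rabbit.py | rabbits
-- ===== SOURCE A (Python) =====
-- def rabbits(n, k):
--     mate_pairs = 1
--     if n == 1:
--         return 1
--     elif n == 2:
--         return 1
--     elif n == 3:
--        return 1 + k
--     else:
--         return rabbits(n-1, k) + rabbits(n-2,k)*k
-- ===== SOURCE B (Python) =====
-- def rabbits(n, k):
--     a, b = 1, 1
--     for _ in range(n - 2):
--         a, b = b, b + a * k
--     return b
-- ===== Notes on version B (the rewrite author's own statement) =====
-- stated objective: faster
-- what changed: replaced the exponential two-branch recursion by an iterative DP loop keeping the last two values; intended as faster (asymptotic) — a timing run could not measure a ratio because A already timed out at n=16 where B returned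
import Mathlib
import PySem

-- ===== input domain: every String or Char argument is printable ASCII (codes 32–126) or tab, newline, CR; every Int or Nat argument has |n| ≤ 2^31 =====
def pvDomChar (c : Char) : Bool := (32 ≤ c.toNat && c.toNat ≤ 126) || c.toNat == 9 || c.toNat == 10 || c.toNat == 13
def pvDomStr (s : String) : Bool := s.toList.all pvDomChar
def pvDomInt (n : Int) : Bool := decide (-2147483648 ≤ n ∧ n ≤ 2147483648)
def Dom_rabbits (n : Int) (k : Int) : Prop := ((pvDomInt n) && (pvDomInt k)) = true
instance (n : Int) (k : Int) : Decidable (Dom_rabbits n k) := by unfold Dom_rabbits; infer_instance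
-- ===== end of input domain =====

-- B replaces A's two-branch recursion by an iterative DP loop over the last two values; intended as faster (a timing run could not measure a ratio: A timed out at n=16 where B returned).


-- ===== PORT A =====
-- A's recursion, with fuel making it total in Lean; fuel n.toNat suffices on Pre_ (1 ≤ n),
-- exactly where Python A terminates.
def rabbitsAux (fuel : Nat) (n : Int) (k : Int) : Int :=
  match fuel with
  | 0 => 0
  | fuel + 1 =>
    if n == 1 then 1
    else if n == 2 then 1
    else if n == 3 then 1 + k
    else rabbitsAux fuel (n - 1) k + rabbitsAux fuel (n - 2) k * k

def rabbits (n : Int) (k : Int) : Int := rabbitsAux n.toNat n k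

-- ===== PORT B =====
-- Source B's loop: m iterations of (a, b) := (b, b + a*k); m = (n-2) iterations of range(n-2).
def rabbitsLoop (m : Nat) (a b k : Int) : Int × Int :=
  match m with
  | 0 => (a, b)
  | m + 1 => rabbitsLoop m b (b + a * k) k

def rabbits_alt (n : Int) (k : Int) : Int := (rabbitsLoop (n - 2).toNat 1 1 k).2

-- ===== PRECONDITION & SPEC =====
-- Pre_ excludes n ≤ 0, where A's recursion never terminates (Python RecursionError).
def Pre_rabbits (n : Int) (k : Int) : Prop := 1 ≤ n
instance (n : Int) (k : Int) : Decidable (Pre_rabbits n k) := by unfold Pre_rabbits; infer_instance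
def pvWitness_rabbits : Int × Int := (7, 3)

def Spec_rabbits (n : Int) (k : Int) (out : Int) : Prop := out = rabbits_alt n k
instance (n : Int) (k : Int) (out : Int) : Decidable (Spec_rabbits n k out) := by unfold Spec_rabbits; infer_instance

-- ===== CLAIM (what is proved, stated in full; the proofs are below) =====
def Claim_equal_rabbits : Prop := ∀ (n : Int) (k : Int), Dom_rabbits n k → Pre_rabbits n k → Spec_rabbits n k (rabbits n k)

-- ===== LEMMAS AND PROOFS =====
-- The mathematical sequence both programs compute, indexed by Nat.
def rabbitsSeq (k : Int) : Nat → Int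
  | 0 => 0
  | 1 => 1
  | 2 => 1
  | (m + 3) => rabbitsSeq k (m + 2) + rabbitsSeq k (m + 1) * k

theorem rabbitsAux_eq_seq (fuel : Nat) (n : Int) (k : Int) (h1 : 1 ≤ n) (hf : n.toNat ≤ fuel) :
    rabbitsAux fuel n k = rabbitsSeq k n.toNat := by
  induction fuel generalizing n with
  | zero => omega
  | succ fuel ih =>
    rw [rabbitsAux]
    by_cases h1' : n = 1
    · subst h1'; simp [rabbitsSeq]
    by_cases h2 : n = 2
    · subst h2; simp [rabbitsSeq]
    by_cases h3 : n = 3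
    · subst h3; simp [rabbitsSeq]
    · have h4 : 4 ≤ n := by omega
      obtain ⟨m, hm⟩ : ∃ m : Nat, n.toNat = m + 3 := ⟨n.toNat - 3, by omega⟩
      have e1 : (n - 1).toNat = m + 2 := by omega
      have e2 : (n - 2).toNat = m + 1 := by omega
      rw [if_neg (by simpa using h1'), if_neg (by simpa using h2), if_neg (by simpa using h3),
        ih (n - 1) (by omega) (by omega), ih (n - 2) (by omega) (by omega), e1, e2, hm,
        rabbitsSeq]

theorem rabbitsLoop_seq (m j : Nat) (k : Int) :
    rabbitsLoop m (rabbitsSeq k (j + 1)) (rabbitsSeq k (j + 2)) k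
      = (rabbitsSeq k (j + 1 + m), rabbitsSeq k (j + 2 + m)) := by
  induction m generalizing j with
  | zero => simp [rabbitsLoop]
  | succ m ih =>
    rw [rabbitsLoop]
    have : rabbitsSeq k (j + 2) + rabbitsSeq k (j + 1) * k = rabbitsSeq k (j + 1 + 2) := by
      rw [show j + 1 + 2 = j + 3 from rfl, rabbitsSeq]
    rw [this, ih (j + 1)]
    congr 1 <;> congr 1 <;> omega

theorem rabbits_alt_eq_seq (n : Int) (k : Int) (h1 : 1 ≤ n) :
    rabbits_alt n k = rabbitsSeq k n.toNat := by
  unfold rabbits_alt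
  have key := rabbitsLoop_seq (n - 2).toNat 0 k
  simp only [show rabbitsSeq k (0 + 1) = 1 from rfl, show rabbitsSeq k (0 + 2) = 1 from rfl] at key
  rw [key]
  by_cases h : n = 1
  · subst h; rfl
  · have : (n - 2).toNat = n.toNat - 2 := by omega
    simp only [this]
    congr 1
    omega

-- ===== VERDICT (by name: the statement is the Claim_ definition above) =====
theorem rabbits_spec : Claim_equal_rabbits := by
  intro n k _ hpre
  unfold Spec_rabbits
  rw [rabbits, rabbitsAux_eq_seq n.toNat n k hpre le_rfl, rabbits_alt_eq_seq n k hpre]
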